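-- pv_equiv track=rewrite | github.com/Amruth021/Cipher-Breaker | plugins/caesar_plugin.py | transform
-- ===== SOURCE A (Python) =====
-- LETTERS = "ABCDEFGHIJKLMNOPQRSTUVWXYZ"
--
-- def transform(text: str) -> list[str]:
--     results = []
--     for shift in range(1, 26):  # ROT1..ROT25
--         decoded = []
--         for c in text:
--             if c.upper() in LETTERS:
--                 idx = (LETTERS.index(c.upper()) - shift) % 26
--                 decoded.append(LETTERS[idx] if c.isupper() else LETTERS[idx].lower())
--             else:
--                 decoded.append(c)
--         results.append("".join(decoded))
--     return results
-- ===== SOURCE B (Python) =====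
-- def _rot1(s):
--     out = []
--     for ch in s:
--         if 'A' <= ch <= 'Z':
--             out.append('Z' if ch == 'A' else chr(ord(ch) - 1))
--         elif 'a' <= ch <= 'z':
--             out.append('z' if ch == 'a' else chr(ord(ch) - 1))
--         else:
--             out.append(ch)
--     return ''.join(out)
--
-- def transform(text: str) -> list[str]:
--     results = []
--     cur = text
--     for _ in range(25):
--         cur = _rot1(cur)
--         results.append(cur)
--     return results
-- ===== Notes on version B (the rewrite author's own statement) =====
-- stated objective: faster
-- what changed: Instead of 25 independent passes that recompute an absolute shift via LETTERS.index (a 26-element scan) per character, B keeps a running string and derives each decoding from the previous one by a single ROT1 step using constant-time character arithmetic (ord/chr), appending each intermediate string.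
import Mathlib
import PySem

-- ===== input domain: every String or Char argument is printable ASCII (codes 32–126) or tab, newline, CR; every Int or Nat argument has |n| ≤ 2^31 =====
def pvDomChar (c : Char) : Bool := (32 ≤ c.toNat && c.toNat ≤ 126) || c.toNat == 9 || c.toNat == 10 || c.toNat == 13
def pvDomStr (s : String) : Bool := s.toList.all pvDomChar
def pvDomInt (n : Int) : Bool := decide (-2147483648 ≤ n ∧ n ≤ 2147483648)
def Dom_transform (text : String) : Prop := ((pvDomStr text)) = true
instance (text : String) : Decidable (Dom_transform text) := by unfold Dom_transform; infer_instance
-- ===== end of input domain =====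

-- B replaces A's 25 absolute-shift passes (each recomputing LETTERS.index per char) by an
-- incremental loop that repeatedly applies a single ROT1 decode to the previous result (objective: faster constant factor).

-- ===== PORT A =====
def lettersL : List Char := "ABCDEFGHIJKLMNOPQRSTUVWXYZ".toList

-- one character of A's inner loop; LETTERS.index is guarded by the membership test,
-- and idx = (… ) % 26 is always in range, so the two .getD defaults are never used
def decChar (shift : Int) (c : Char) : Char :=
  if PySem.Chars.isIn [PySem.Chars.upperChar c] lettersL then
    let idx := PySem.Int.mod ((((PySem.List.index? lettersL (PySem.Chars.upperChar c)).getD 0 : Nat) : Int) - shift) 26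
    let L := (PySem.List.pyGet? lettersL idx).getD c
    if PySem.Chars.isupper c then L else PySem.Chars.lowerChar L
  else c

def transform (text : String) : List String :=
  (PySem.List.pyRange 1 26 1).foldl
    (fun results shift =>
      results ++ [String.ofList (text.toList.foldl (fun decoded c => decoded ++ [decChar shift c]) [])])
    []

-- ===== PORT B =====
def rot1Char (c : Char) : Char :=
  if 'A' ≤ c ∧ c ≤ 'Z' then (if c = 'A' then 'Z' else Char.ofNat (c.toNat - 1))
  else if 'a' ≤ c ∧ c ≤ 'z' then (if c = 'a' then 'z' else Char.ofNat (c.toNat - 1))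
  else c

def rot1Str (s : String) : String :=
  String.ofList (s.toList.foldl (fun out ch => out ++ [rot1Char ch]) [])

def rotGo : Nat → String → List String
  | 0, _ => []
  | k+1, cur => rot1Str cur :: rotGo k (rot1Str cur)

def transform_alt (text : String) : List String := rotGo 25 text

-- ===== PRECONDITION & SPEC =====
def Spec_transform (text : String) (out : List String) : Prop := out = transform_alt text
instance (text : String) (out : List String) : Decidable (Spec_transform text out) := by unfold Spec_transform; infer_instance

-- ===== CLAIM (what is proved, stated in full; the proofs are below) =====
def Claim_equal_transform : Prop := ∀ (text : String), Dom_transform text → Spec_transform text (transform text)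

-- ===== LEMMAS AND PROOFS =====

-- one ROT1 step on a char already decoded with shift s equals decoding with shift s+1 (checked over the ASCII domain)
set_option maxHeartbeats 4000000 in
set_option maxRecDepth 10000 in
theorem step_char : ∀ s < 25, ∀ n < 127,
    rot1Char (decChar ((s : Nat) : Int) (Char.ofNat n)) = decChar (((s : Nat) : Int) + 1) (Char.ofNat n) := by
  decide

-- shift 0 decodes to the character itself (checked over the ASCII domain)
set_option maxHeartbeats 1000000 in
set_option maxRecDepth 10000 in
theorem base_char : ∀ n < 127, decChar 0 (Char.ofNat n) = Char.ofNat n := by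
  decide

theorem dom_toNat_lt {c : Char} (hc : pvDomChar c = true) : c.toNat < 127 := by
  unfold pvDomChar at hc
  simp only [Bool.or_eq_true, Bool.and_eq_true, decide_eq_true_eq, beq_iff_eq] at hc
  omega

theorem step_char' {c : Char} (hc : pvDomChar c = true) {s : Nat} (hs : s < 25) :
    rot1Char (decChar ((s : Nat) : Int) c) = decChar (((s + 1 : Nat)) : Int) c := by
  rw [← Char.ofNat_toNat c]
  have h := step_char s hs c.toNat (dom_toNat_lt hc)
  rwa [show (((s : Nat) : Int) + 1) = (((s + 1 : Nat)) : Int) by push_cast; ring] at h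

theorem base_char' {c : Char} (hc : pvDomChar c = true) : decChar 0 c = c := by
  rw [← Char.ofNat_toNat c]
  exact base_char c.toNat (dom_toNat_lt hc)

theorem rot1Str_map {l : List Char} (hl : ∀ c ∈ l, pvDomChar c = true) {s : Nat} (hs : s < 25) :
    rot1Str (String.ofList (l.map (decChar ((s : Nat) : Int)))) =
      String.ofList (l.map (decChar (((s + 1 : Nat)) : Int))) := by
  unfold rot1Str
  rw [PySem.List.foldl_append_singleton_eq_map]
  simp only [String.toList_ofList, List.nil_append, List.map_map]
  congr 1
  exact List.map_congr_left (fun c hc => step_char' (hl c hc) hs)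

theorem rotGo_map {l : List Char} (hl : ∀ c ∈ l, pvDomChar c = true) :
    ∀ (m s : Nat), s + m ≤ 25 →
      rotGo m (String.ofList (l.map (decChar ((s : Nat) : Int)))) =
        (List.range m).map (fun k => String.ofList (l.map (decChar ((s + k + 1 : Nat) : Int)))) := by
  intro m
  induction m with
  | zero => intro s _; simp [rotGo]
  | succ k ih =>
    intro s hsm
    have hs : s < 25 := by omega
    rw [rotGo, rot1Str_map hl hs, ih (s + 1) (by omega), List.range_succ_eq_map]
    simp only [List.map_cons, List.map_map, Nat.add_zero]
    refine congrArg₂ List.cons rfl (List.map_congr_left ?_)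
    intro k' _
    simp only [Function.comp]
    have h : s + 1 + k' + 1 = s + (k' + 1) + 1 := by omega
    rw [h]

theorem transform_char_form (text : String) :
    transform text =
      (List.range 25).map (fun k => String.ofList (text.toList.map (decChar ((k + 1 : Nat) : Int)))) := by
  have hrange : PySem.List.pyRange 1 26 1 = (List.range 25).map (fun k : Nat => ((k + 1 : Nat) : Int)) := by
    decide
  unfold transform
  rw [hrange, PySem.List.foldl_append_singleton_eq_map]
  simp only [List.nil_append, List.map_map]
  apply List.map_congr_left
  intro k _
  simp only [Function.comp]
  rw [PySem.List.foldl_append_singleton_eq_map]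
  simp

-- ===== VERDICT (by name: the statement is the Claim_ definition above) =====
theorem transform_spec : Claim_equal_transform := by
  intro text hdom
  unfold Spec_transform transform_alt
  have hl : ∀ c ∈ text.toList, pvDomChar c = true := by
    unfold Dom_transform pvDomStr at hdom
    exact List.all_eq_true.mp hdom
  have htext : String.ofList (text.toList.map (decChar (((0 : Nat)) : Int))) = text := by
    simp only [Nat.cast_zero]
    rw [List.map_congr_left (fun c hc => base_char' (hl c hc))]
    simp
  calc transform text
      = (List.range 25).map (fun k => String.ofList (text.toList.map (decChar ((k + 1 : Nat) : Int)))) :=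
        transform_char_form text
    _ = (List.range 25).map (fun k => String.ofList (text.toList.map (decChar ((0 + k + 1 : Nat) : Int)))) := by
        simp
    _ = rotGo 25 (String.ofList (text.toList.map (decChar (((0 : Nat)) : Int)))) :=
        (rotGo_map hl 25 0 (by omega)).symm
    _ = rotGo 25 text := by rw [htext]
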